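-- pv_equiv track=rewrite | github.com/zakon991/neto_test | main_task2.py | group_courses_by_duration
-- ===== SOURCE A (Python) =====
-- def group_courses_by_duration(courses_list):
--     durations_dict = {}
--     for idx, course in enumerate(courses_list):
--         key = course["duration"]
--         if key in durations_dict:
--             durations_dict[key].append(idx)
--         else:
--             durations_dict[key] = [idx]
--     return dict(sorted(durations_dict.items()))
-- ===== SOURCE B (Python) =====
-- def group_courses_by_duration(courses_list):
--     durations = sorted({course["duration"] for course in courses_list})
--     return {d: [idx for idx, course in enumerate(courses_list) if course["duration"] == d]
--             for d in durations}
-- ===== Notes on version B (the rewrite author's own statement) =====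
-- stated objective: simpler
-- what changed: B replaces A's one-pass dict-of-lists grouping followed by sorting the items with the reverse decomposition: collect the distinct durations as a set, sort them, and build each group by an independent comprehension scan over the courses.
import Mathlib
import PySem

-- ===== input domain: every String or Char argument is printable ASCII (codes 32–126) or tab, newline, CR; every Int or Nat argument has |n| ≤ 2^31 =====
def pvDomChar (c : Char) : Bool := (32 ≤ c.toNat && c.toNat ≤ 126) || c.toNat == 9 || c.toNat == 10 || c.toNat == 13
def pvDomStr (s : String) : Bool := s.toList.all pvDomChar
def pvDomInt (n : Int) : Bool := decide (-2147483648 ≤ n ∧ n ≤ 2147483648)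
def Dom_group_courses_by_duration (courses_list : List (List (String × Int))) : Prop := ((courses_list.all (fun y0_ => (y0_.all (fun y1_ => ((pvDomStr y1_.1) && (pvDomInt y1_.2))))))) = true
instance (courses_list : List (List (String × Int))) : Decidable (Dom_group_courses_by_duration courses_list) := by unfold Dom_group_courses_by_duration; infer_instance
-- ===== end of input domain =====

-- B groups by sorting the distinct durations and scanning the course list once per duration,
-- instead of A's dict-of-lists grouping pass followed by sorting the items.
-- NOTE: Python A sorts durations_dict.items() (tuples); since dict keys are unique the tuple
-- comparison never reaches the list component, so sorting by the key alone is exact.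

-- ===== PORT A =====
def group_courses_by_duration (courses_list : List (List (String × Int))) : List (Int × List Int) :=
  PySem.List.sorted
    ((PySem.List.enumerate courses_list).foldl
      (fun d p =>
        -- key := course["duration"]  (KeyError on a missing key is excluded by Pre_)
        if d.contains (((PySem.Dict.mk p.2).get? "duration").getD 0) then
          -- durations_dict[key].append(idx)
          d.insert (((PySem.Dict.mk p.2).get? "duration").getD 0)
            (d.getD (((PySem.Dict.mk p.2).get? "duration").getD 0) [] ++ [p.1])
        else
          -- durations_dict[key] = [idx]
          d.insert (((PySem.Dict.mk p.2).get? "duration").getD 0) [p.1])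
      (PySem.Dict.empty : PySem.Dict Int (List Int))).items
    (fun q => q.1) false

-- ===== PORT B =====
def group_courses_by_duration_alt (courses_list : List (List (String × Int))) : List (Int × List Int) :=
  (PySem.List.sorted
    (PySem.Set.ofList (courses_list.map
      (fun course => ((PySem.Dict.mk course).get? "duration").getD 0)))
    (fun x => x) false).map
    (fun d =>
      (d, (PySem.List.enumerate courses_list).foldl
            (fun acc p =>
              if ((PySem.Dict.mk p.2).get? "duration").getD 0 == d then acc ++ [p.1] else acc)
            []))

-- ===== PRECONDITION & SPEC =====
-- Pre_ excludes exactly the inputs where some course lacks a "duration" key: there Python A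
-- (and Python B alike) raises KeyError.
def Pre_group_courses_by_duration (courses_list : List (List (String × Int))) : Prop :=
  (courses_list.all (fun course => course.any (fun q => q.1 == "duration"))) = true
instance (courses_list : List (List (String × Int))) : Decidable (Pre_group_courses_by_duration courses_list) := by unfold Pre_group_courses_by_duration; infer_instance

def pvWitness_group_courses_by_duration : (List (List (String × Int))) :=
  [[("duration", 3), ("id", 1)], [("duration", 2)], [("duration", 3)]]

def Spec_group_courses_by_duration (courses_list : List (List (String × Int))) (out : List (Int × List Int)) : Prop := out = group_courses_by_duration_alt courses_list
instance (courses_list : List (List (String × Int))) (out : List (Int × List Int)) : Decidable (Spec_group_courses_by_duration courses_list out) := by unfold Spec_group_courses_by_duration; infer_instance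

-- ===== CLAIM (what is proved, stated in full; the proofs are below) =====
def Claim_equal_group_courses_by_duration : Prop := ∀ (courses_list : List (List (String × Int))), Dom_group_courses_by_duration courses_list → Pre_group_courses_by_duration courses_list → Spec_group_courses_by_duration courses_list (group_courses_by_duration courses_list)

-- ===== LEMMAS AND PROOFS =====

-- the duration A and B read from a course dict (first match, as Python's course["duration"])
def pvKey (course : List (String × Int)) : Int :=
  ((PySem.Dict.mk course).get? "duration").getD 0

theorem pv_main (courses_list : List (List (String × Int))) :
    group_courses_by_duration courses_list = group_courses_by_duration_alt courses_list := by
  unfold group_courses_by_duration group_courses_by_duration_alt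
  -- A's loop body is exactly Dict.modify (append), in both branches
  have hfun : (fun (d : PySem.Dict Int (List Int)) (p : Int × List (String × Int)) =>
        if d.contains (((PySem.Dict.mk p.2).get? "duration").getD 0) then
          d.insert (((PySem.Dict.mk p.2).get? "duration").getD 0)
            (d.getD (((PySem.Dict.mk p.2).get? "duration").getD 0) [] ++ [p.1])
        else
          d.insert (((PySem.Dict.mk p.2).get? "duration").getD 0) [p.1])
      = (fun d p => d.modify (pvKey p.2) [] (fun v => v ++ [p.1])) := by
    funext d p
    by_cases h : d.contains (((PySem.Dict.mk p.2).get? "duration").getD 0)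
    · simp only [pvKey, PySem.Dict.modify, h, if_true]
    · rw [Bool.not_eq_true] at h
      simp only [pvKey, PySem.Dict.modify, h, Bool.false_eq_true, if_false,
        PySem.Dict.getD_of_not_contains _ _ h, List.nil_append]
  rw [hfun]
  rw [show (PySem.List.enumerate courses_list).foldl
        (fun d p => d.modify (pvKey p.2) [] (fun v => v ++ [p.1]))
        (PySem.Dict.empty : PySem.Dict Int (List Int))
      = ((PySem.List.enumerate courses_list).map (fun p => (pvKey p.2, p.1))).foldl
        (fun d q => d.modify q.1 [] (fun v => v ++ [q.2]))
        (PySem.Dict.empty : PySem.Dict Int (List Int)) from by rw [List.foldl_map]]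
  set L := (PySem.List.enumerate courses_list).map (fun p => (pvKey p.2, p.1)) with hL
  set D := L.foldl (fun d q => d.modify q.1 [] (fun v => v ++ [q.2]))
    (PySem.Dict.empty : PySem.Dict Int (List Int)) with hD
  have hval : ∀ c : Int, D.getD c [] = (L.filter (fun q => q.1 == c)).map (fun q => q.2) := by
    intro c
    rw [hD, PySem.Dict.getD_foldl_modify_append]
    simp
  have hnd : D.keys.Nodup := by
    rw [hD]
    exact PySem.Dict.nodup_keys_foldl_modify_key L Prod.fst []
      (fun _ q => fun v => v ++ [q.2]) _ PySem.Dict.nodup_keys_empty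
  have hds : L.map Prod.fst = courses_list.map pvKey := by
    rw [hL, List.map_map]
    have := PySem.List.map_snd_enumerate courses_list (0 : Int)
    calc (PySem.List.enumerate courses_list).map ((fun q => q.1) ∘ fun p => (pvKey p.2, p.1))
        = ((PySem.List.enumerate courses_list).map (fun p => p.2)).map pvKey := by
          rw [List.map_map]; rfl
      _ = courses_list.map pvKey := by rw [this]
  have hkeys : D.keys = PySem.Set.ofList (courses_list.map pvKey) := by
    rw [hD]
    rw [PySem.Dict.keys_foldl_modify_key L Prod.fst [] (fun _ q => fun v => v ++ [q.2])]
    rw [hds]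
    rfl
  have hitems : D.items = D.keys.map (fun k => (k, D.getD k [])) :=
    PySem.Dict.items_eq_map_keys D hnd []
  -- name the sorted distinct durations
  set durs := PySem.List.sorted (PySem.Set.ofList (courses_list.map
      (fun course => ((PySem.Dict.mk course).get? "duration").getD 0))) (fun x => x) false with hdurs
  have hdurs' : durs = PySem.List.sorted (PySem.Set.ofList (courses_list.map pvKey)) (fun x => x) false := rfl
  -- B's inner scan computes D's stored list
  have hpt : ∀ k : Int,
      ((PySem.List.enumerate courses_list).foldl
        (fun acc p => if ((PySem.Dict.mk p.2).get? "duration").getD 0 == k then acc ++ [p.1] else acc)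
        ([] : List Int)) = D.getD k [] := by
    intro k
    rw [PySem.List.foldl_append_if]
    rw [hval k, hL, List.filter_map, List.map_map]
    rfl
  -- rewrite B's map pointwise
  rw [List.map_congr_left (fun k _ => by rw [hpt k] :
    ∀ k ∈ durs, (k, (PySem.List.enumerate courses_list).foldl
      (fun acc p => if ((PySem.Dict.mk p.2).get? "duration").getD 0 == k then acc ++ [p.1] else acc)
      ([] : List Int)) = (k, D.getD k []))]
  -- A's sorted items ARE the durations in increasing order, each with its stored list
  apply PySem.List.sorted_eq_of_perm_of_pairwise_lt
  · rw [hitems, hkeys, hdurs']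
    exact (PySem.List.sorted_perm _ _ _).map _
  · rw [hdurs']
    exact List.pairwise_map.mpr (by
      have := PySem.List.sorted_ofList_pairwise_lt (courses_list.map pvKey)
      exact this.imp (fun h => h))

-- ===== VERDICT (by name: the statement is the Claim_ definition above) =====
theorem group_courses_by_duration_spec : Claim_equal_group_courses_by_duration := by
  intro courses_list _ _
  unfold Spec_group_courses_by_duration
  exact pv_main courses_list
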